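-- pv_equiv track=rewrite | github.com/mei28/kapao | exp/20220228/deepsort2kapao.py | get_masked_data
-- ===== SOURCE A (Python) =====
-- def get_masked_data(data: list, mask_id: int = -1):
--     """get data whose mask id is the same."""
--     ret = []
--     for d in data:
--         if d[0] == mask_id:
--             ret.append(d)
--         if d[0] > mask_id:
--             break
--     return ret
-- ===== SOURCE B (Python) =====
-- def get_masked_data(data: list, mask_id: int = -1):
--     """get data whose mask id is the same."""
--     if not data or data[0][0] > mask_id:
--         return []
--     rest = get_masked_data(data[1:], mask_id)
--     return [data[0]] + rest if data[0][0] == mask_id else rest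
-- ===== Notes on version B (the rewrite author's own statement) =====
-- stated objective: alternative
-- what changed: Replaces the iterative loop with append-to-accumulator and break by a structural recursion that stops at the first row whose head exceeds mask_id and builds the result front-to-back by cons.
import Mathlib
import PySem

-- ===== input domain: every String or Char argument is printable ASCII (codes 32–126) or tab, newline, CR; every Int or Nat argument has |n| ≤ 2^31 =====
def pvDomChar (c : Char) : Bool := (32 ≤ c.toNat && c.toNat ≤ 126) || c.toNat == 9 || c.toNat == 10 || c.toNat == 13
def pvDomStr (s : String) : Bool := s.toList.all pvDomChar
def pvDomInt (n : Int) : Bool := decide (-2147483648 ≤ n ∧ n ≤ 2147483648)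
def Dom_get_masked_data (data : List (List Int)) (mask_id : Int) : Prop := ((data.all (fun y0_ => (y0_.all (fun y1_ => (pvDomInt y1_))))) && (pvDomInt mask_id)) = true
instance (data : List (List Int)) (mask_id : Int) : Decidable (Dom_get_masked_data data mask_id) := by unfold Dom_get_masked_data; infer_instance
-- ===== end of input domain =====

-- B replaces A's loop-with-break-and-accumulator by a structural recursion building the
-- result front-to-back (objective: alternative decomposition, same cost).


-- ===== PORT A =====
-- loop over data with accumulator ret; `d.headI` is Python's d[0], exact because
-- Pre_ guarantees every row is nonempty (on an empty row Python raises IndexError).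
def get_masked_data_go (mask_id : Int) : List (List Int) → List (List Int) → List (List Int)
  | [], ret => ret
  | d :: rest, ret =>
    let ret' := if d.headI = mask_id then ret ++ [d] else ret
    if d.headI > mask_id then ret' else get_masked_data_go mask_id rest ret'

def get_masked_data (data : List (List Int)) (mask_id : Int) : List (List Int) :=
  get_masked_data_go mask_id data []

-- ===== PORT B =====
def get_masked_data_alt (data : List (List Int)) (mask_id : Int) : List (List Int) :=
  match data with
  | [] => []
  | d :: rest =>
    if d.headI > mask_id then []
    else if d.headI = mask_id then d :: get_masked_data_alt rest mask_id
    else get_masked_data_alt rest mask_id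

-- ===== PRECONDITION & SPEC =====
-- Pre_ excludes exactly the inputs on which Python raises IndexError: an empty row that the
-- scan reaches, i.e. one not preceded by a nonempty row whose head exceeds mask_id (the break).
def Pre_get_masked_data (data : List (List Int)) (mask_id : Int) : Prop :=
  ∀ i < data.length, data.getD i [] = [] →
    ∃ j < i, data.getD j [] ≠ [] ∧ (data.getD j []).headI > mask_id
instance (data : List (List Int)) (mask_id : Int) : Decidable (Pre_get_masked_data data mask_id) := by unfold Pre_get_masked_data; infer_instance

def pvWitness_get_masked_data : List (List Int) × Int := ([[0, 7], [1, 8], [2, 9]], 1)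

def Spec_get_masked_data (data : List (List Int)) (mask_id : Int) (out : List (List Int)) : Prop := out = get_masked_data_alt data mask_id
instance (data : List (List Int)) (mask_id : Int) (out : List (List Int)) : Decidable (Spec_get_masked_data data mask_id out) := by unfold Spec_get_masked_data; infer_instance

-- ===== CLAIM (what is proved, stated in full; the proofs are below) =====
def Claim_equal_get_masked_data : Prop := ∀ (data : List (List Int)) (mask_id : Int), Dom_get_masked_data data mask_id → Pre_get_masked_data data mask_id → Spec_get_masked_data data mask_id (get_masked_data data mask_id)

-- ===== LEMMAS AND PROOFS =====
theorem go_eq_alt (mask_id : Int) (data : List (List Int)) :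
    ∀ ret, get_masked_data_go mask_id data ret = ret ++ get_masked_data_alt data mask_id := by
  induction data with
  | nil => intro ret; simp [get_masked_data_go, get_masked_data_alt]
  | cons d rest ih =>
    intro ret
    simp only [get_masked_data_go, get_masked_data_alt]
    by_cases hgt : d.headI > mask_id
    · have hne : ¬ d.headI = mask_id := by omega
      simp [hgt, hne]
    · by_cases heq : d.headI = mask_id
      · simp [heq, ih]
      · simp [hgt, heq, ih]

-- ===== VERDICT (by name: the statement is the Claim_ definition above) =====
theorem get_masked_data_spec : Claim_equal_get_masked_data := by
  intro data mask_id _ _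
  unfold Spec_get_masked_data get_masked_data
  simpa using go_eq_alt mask_id data []
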